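-- pv_equiv track=rewrite | github.com/layna23/monitor_ia_clean | collect_flow.py | get_metric_category
-- ===== SOURCE A (Python) =====
-- DB_CATEGORIES = {
--     "ORACLE": {
--         "SESSIONS": {
--             "ACTIVE_SESSIONS",
--             "SESSION_COUNT",
--             "TOTAL_SESSIONS",
--             "LOCKED_OBJECTS",
--             "ACTIVE_TRANSACTIONS",
--         },
--         "STATUT": {
--             "DB_STATUS",
--             "DB_INFO",
--         },
--         "PERFORMANCE": {
--             "CPU_USED_SESSION",
--             "INSTANCE_UPTIME_HOURS",
--             "CPU_USAGE",
--             "RAM_USAGE",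
--         },
--         "AUTRES": {
--             "TEST_METRIC_02",
--         },
--     },
--     "MYSQL": {
--         "THREADS": {
--             "THREADS_RUNNING",
--             "THREADS_CONNECTED",
--         },
--         "AUTRES": set(),
--     },
-- }
--
-- def get_metric_category(db_type_code: str, metric_code: str) -> str:
--     db_type_code = str(db_type_code or "").strip().upper()
--     metric_code = str(metric_code or "").strip().upper()
--
--     categories = DB_CATEGORIES.get(db_type_code, {})
--     for category_name, metric_codes in categories.items():
--         if metric_code in metric_codes:
--             return category_name
--     return "AUTRES"
-- ===== SOURCE B (Python) =====
-- DB_CATEGORIES = {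
--     "ORACLE": {
--         "SESSIONS": {
--             "ACTIVE_SESSIONS",
--             "SESSION_COUNT",
--             "TOTAL_SESSIONS",
--             "LOCKED_OBJECTS",
--             "ACTIVE_TRANSACTIONS",
--         },
--         "STATUT": {
--             "DB_STATUS",
--             "DB_INFO",
--         },
--         "PERFORMANCE": {
--             "CPU_USED_SESSION",
--             "INSTANCE_UPTIME_HOURS",
--             "CPU_USAGE",
--             "RAM_USAGE",
--         },
--         "AUTRES": {
--             "TEST_METRIC_02",
--         },
--     },
--     "MYSQL": {
--         "THREADS": {
--             "THREADS_RUNNING",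
--             "THREADS_CONNECTED",
--         },
--         "AUTRES": set(),
--     },
-- }
--
-- # flat reverse index built once: (db_type, metric) -> category (first insertion wins)
-- _INDEX = {}
-- for _db, _cats in DB_CATEGORIES.items():
--     for _cat, _metrics in _cats.items():
--         for _m in _metrics:
--             if (_db, _m) not in _INDEX:
--                 _INDEX[(_db, _m)] = _cat
--
-- def get_metric_category(db_type_code: str, metric_code: str) -> str:
--     db_type_code = str(db_type_code or "").strip().upper()
--     metric_code = str(metric_code or "").strip().upper()
--     return _INDEX.get((db_type_code, metric_code), "AUTRES")
-- ===== Notes on version B (the rewrite author's own statement) =====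
-- stated objective: simpler
-- what changed: Replaces the per-call scan over the db-type's categories with a module-level flat reverse index dict (db_type, metric) -> category built once, so the function body is a single dict lookup with 'AUTRES' default.
import Mathlib
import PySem

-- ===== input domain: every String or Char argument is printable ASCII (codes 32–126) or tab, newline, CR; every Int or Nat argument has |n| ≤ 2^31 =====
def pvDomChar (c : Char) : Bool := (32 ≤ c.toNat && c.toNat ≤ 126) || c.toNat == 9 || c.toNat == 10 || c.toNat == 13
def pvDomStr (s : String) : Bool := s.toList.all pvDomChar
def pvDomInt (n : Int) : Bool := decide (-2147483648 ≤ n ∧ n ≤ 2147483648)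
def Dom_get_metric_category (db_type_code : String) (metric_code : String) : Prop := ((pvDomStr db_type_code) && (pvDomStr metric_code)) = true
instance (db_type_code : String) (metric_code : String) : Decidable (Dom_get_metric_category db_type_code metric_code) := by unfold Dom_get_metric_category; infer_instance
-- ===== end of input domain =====

-- B replaces A's per-call scan over the db-type's categories by a single lookup in a
-- flat reverse index (db_type, metric) -> category built once at module level; objective: simpler.

-- ===== PORT A =====
-- module constant DB_CATEGORIES (dict literal with distinct keys, insertion order; sets used for membership only)
def dbCategories : PySem.Dict String (PySem.Dict String (PySem.Set String)) :=
  ⟨[ ("ORACLE",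
      ⟨[ ("SESSIONS", PySem.Set.ofList ["ACTIVE_SESSIONS", "SESSION_COUNT", "TOTAL_SESSIONS", "LOCKED_OBJECTS", "ACTIVE_TRANSACTIONS"]),
         ("STATUT", PySem.Set.ofList ["DB_STATUS", "DB_INFO"]),
         ("PERFORMANCE", PySem.Set.ofList ["CPU_USED_SESSION", "INSTANCE_UPTIME_HOURS", "CPU_USAGE", "RAM_USAGE"]),
         ("AUTRES", PySem.Set.ofList ["TEST_METRIC_02"]) ]⟩),
     ("MYSQL",
      ⟨[ ("THREADS", PySem.Set.ofList ["THREADS_RUNNING", "THREADS_CONNECTED"]),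
         ("AUTRES", PySem.Set.empty) ]⟩) ]⟩

-- A's loop: 'for category_name, metric_codes in categories.items(): if metric_code in metric_codes: return category_name'
def scanCategories (metric : String) : List (String × PySem.Set String) → String
  | [] => "AUTRES"
  | (name, codes) :: rest =>
      if PySem.Set.contains codes metric then name else scanCategories metric rest

def get_metric_category (db_type_code : String) (metric_code : String) : String :=
  -- 'str(x or "").strip().upper()': for a str argument, 'str(x or "")' is x itself (also when x = "")
  let db := PySem.Str.upper (PySem.Str.strip db_type_code)
  let metric := PySem.Str.upper (PySem.Str.strip metric_code)
  let categories := PySem.Dict.getD dbCategories db PySem.Dict.empty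
  scanCategories metric (PySem.Dict.items categories)

-- ===== PORT B =====
-- module-level build of the flat reverse index: (db, metric) -> category, first insertion wins
def flatIndex : PySem.Dict (String × String) String :=
  (PySem.Dict.items dbCategories).foldl (fun d p =>
    (PySem.Dict.items p.2).foldl (fun d q =>
      q.2.foldl (fun d m =>
        if PySem.Dict.contains d (p.1, m) then d else PySem.Dict.insert d (p.1, m) q.1) d) d) PySem.Dict.empty

def get_metric_category_alt (db_type_code : String) (metric_code : String) : String :=
  let db := PySem.Str.upper (PySem.Str.strip db_type_code)
  let metric := PySem.Str.upper (PySem.Str.strip metric_code)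
  PySem.Dict.getD flatIndex (db, metric) "AUTRES"

-- ===== PRECONDITION & SPEC =====
def Spec_get_metric_category (db_type_code : String) (metric_code : String) (out : String) : Prop := out = get_metric_category_alt db_type_code metric_code
instance (db_type_code : String) (metric_code : String) (out : String) : Decidable (Spec_get_metric_category db_type_code metric_code out) := by unfold Spec_get_metric_category; infer_instance

-- ===== CLAIM (what is proved, stated in full; the proofs are below) =====
def Claim_equal_get_metric_category : Prop := ∀ (db_type_code : String) (metric_code : String), Dom_get_metric_category db_type_code metric_code → Spec_get_metric_category db_type_code metric_code (get_metric_category db_type_code metric_code)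

-- ===== LEMMAS AND PROOFS =====

-- the flat index B builds, evaluated once to its literal value
theorem flatIndex_eval : flatIndex =
    ⟨[(("ORACLE", "ACTIVE_SESSIONS"), "SESSIONS"),
      (("ORACLE", "SESSION_COUNT"), "SESSIONS"),
      (("ORACLE", "TOTAL_SESSIONS"), "SESSIONS"),
      (("ORACLE", "LOCKED_OBJECTS"), "SESSIONS"),
      (("ORACLE", "ACTIVE_TRANSACTIONS"), "SESSIONS"),
      (("ORACLE", "DB_STATUS"), "STATUT"),
      (("ORACLE", "DB_INFO"), "STATUT"),
      (("ORACLE", "CPU_USED_SESSION"), "PERFORMANCE"),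
      (("ORACLE", "INSTANCE_UPTIME_HOURS"), "PERFORMANCE"),
      (("ORACLE", "CPU_USAGE"), "PERFORMANCE"),
      (("ORACLE", "RAM_USAGE"), "PERFORMANCE"),
      (("ORACLE", "TEST_METRIC_02"), "AUTRES"),
      (("MYSQL", "THREADS_RUNNING"), "THREADS"),
      (("MYSQL", "THREADS_CONNECTED"), "THREADS")]⟩ := by decide

-- the two cores agree for EVERY pair of strings (normalized or not)
theorem core_eq (s t : String) :
    scanCategories t (PySem.Dict.items (PySem.Dict.getD dbCategories s PySem.Dict.empty)) =
      PySem.Dict.getD flatIndex (s, t) "AUTRES" := by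
  rw [flatIndex_eval]
  by_cases hs : s = "ORACLE"
  · subst hs
    by_cases h1 : t = "ACTIVE_SESSIONS"; · subst h1; decide
    by_cases h2 : t = "SESSION_COUNT"; · subst h2; decide
    by_cases h3 : t = "TOTAL_SESSIONS"; · subst h3; decide
    by_cases h4 : t = "LOCKED_OBJECTS"; · subst h4; decide
    by_cases h5 : t = "ACTIVE_TRANSACTIONS"; · subst h5; decide
    by_cases h6 : t = "DB_STATUS"; · subst h6; decide
    by_cases h7 : t = "DB_INFO"; · subst h7; decide
    by_cases h8 : t = "CPU_USED_SESSION"; · subst h8; decide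
    by_cases h9 : t = "INSTANCE_UPTIME_HOURS"; · subst h9; decide
    by_cases h10 : t = "CPU_USAGE"; · subst h10; decide
    by_cases h11 : t = "RAM_USAGE"; · subst h11; decide
    by_cases h12 : t = "TEST_METRIC_02"; · subst h12; decide
    simp [scanCategories, dbCategories, PySem.Dict.getD, PySem.Dict.get?,
      PySem.Dict.empty, PySem.Set.contains, PySem.Set.ofList, PySem.Set.add,
      List.find?_cons, beq_iff_eq, Prod.mk.injEq,
      h1, h2, h3, h4, h5, h6, h7, h8, h9, h10, h11, h12,
      Ne.symm h1, Ne.symm h2, Ne.symm h3, Ne.symm h4, Ne.symm h5, Ne.symm h6, Ne.symm h7,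
      Ne.symm h8, Ne.symm h9, Ne.symm h10, Ne.symm h11, Ne.symm h12]
  · by_cases hm : s = "MYSQL"
    · subst hm
      by_cases h1 : t = "THREADS_RUNNING"; · subst h1; decide
      by_cases h2 : t = "THREADS_CONNECTED"; · subst h2; decide
      simp [scanCategories, dbCategories, PySem.Dict.getD, PySem.Dict.get?,
        PySem.Dict.empty, PySem.Set.contains, PySem.Set.ofList, PySem.Set.add, PySem.Set.empty,
        List.find?_cons, beq_iff_eq, Prod.mk.injEq, h1, h2, Ne.symm h1, Ne.symm h2]
    · simp [scanCategories, dbCategories, PySem.Dict.getD, PySem.Dict.get?,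
        PySem.Dict.empty, PySem.Set.contains,
        List.find?_cons, beq_iff_eq, Prod.mk.injEq, hs, Ne.symm hs, Ne.symm hm]

-- ===== VERDICT (by name: the statement is the Claim_ definition above) =====
theorem get_metric_category_spec : Claim_equal_get_metric_category := by
  intro db m _
  unfold Spec_get_metric_category get_metric_category get_metric_category_alt
  exact core_eq _ _
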